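-- pv_equiv track=rewrite | github.com/skirat/DarkForge-AI | modules/hero_video_generator.py | _fit_veo_prompt
-- ===== SOURCE A (Python) =====
-- def _fit_veo_prompt(
--     head: str,
--     neighbor_block: str,
--     visual: str,
--     max_len: int,
-- ) -> str:
--     """Keep head (locks + shot variation) intact; trim visual then neighbors if over budget."""
--     visual = (visual or "").strip()
--     sep = "\n\n"
--     # Try full assembly
--     def assemble(v: str, nb: str) -> str:
--         chunks: list[str] = []
--         if head:
--             chunks.append(head)
--         if nb:
--             chunks.append(nb)
--         if v:
--             chunks.append(v)
--         return sep.join(chunks)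
--
--     nb = neighbor_block.strip()
--     body = assemble(visual, nb)
--     if len(body) <= max_len:
--         return body
--     # Drop neighbor text first for space (intra-scene continuity matters more than cross-scene)
--     body = assemble(visual, "")
--     if len(body) <= max_len:
--         return body[:max_len]
--     # Truncate visual from the end (keep opening — usually subject + action)
--     v = visual
--     while len(assemble(v, "")) > max_len and len(v) > 120:
--         v = v[: max(0, len(v) - 40)].rstrip()
--         if len(v) > 0 and v[-1] not in " .,;:":
--             cut = v.rfind(" ")
--             v = v[: cut if cut > 0 else len(v) - 1]
--     out = assemble(v, "")
--     return out[:max_len]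
-- ===== SOURCE B (Python) =====
-- def _fit_veo_prompt(
--     head: str,
--     neighbor_block: str,
--     visual: str,
--     max_len: int,
-- ) -> str:
--     """Index-arithmetic version: track an end index into the stripped visual
--     instead of repeatedly re-slicing and re-joining strings."""
--     v = (visual or "").strip()
--     nb = neighbor_block.strip()
--     sep = "\n\n"
--     full = sep.join([p for p in (head, nb, v) if p])
--     if len(full) <= max_len:
--         return full
--     # length of head + sep + v[:j] assembled, as pure arithmetic
--     head_len = len(head)
--     def length_at(j: int) -> int:
--         if not head:
--             return j
--         return head_len + (len(sep) + j if j > 0 else 0)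
--     j = len(v)
--     if length_at(j) > max_len:
--         while length_at(j) > max_len and j > 120:
--             j -= 40
--             while j > 0 and v[j - 1].isspace():
--                 j -= 1
--             if j > 0 and v[j - 1] not in " .,;:":
--                 cut = v.rfind(" ", 0, j)
--                 j = cut if cut > 0 else j - 1
--     out = head + sep + v[:j] if head and j > 0 else (head if head else v[:j])
--     return out[:max_len]
-- ===== Notes on version B (the rewrite author's own statement) =====
-- stated objective: faster
-- what changed: B replaces A's per-iteration string re-assembly and re-slicing (join/rstrip/rfind on ever-new copies) by pure index arithmetic: it tracks one end-index into the stripped visual, steps it with isspace/rfind(start,end) bound arithmetic, and performs a single final slice.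
import Mathlib
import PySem

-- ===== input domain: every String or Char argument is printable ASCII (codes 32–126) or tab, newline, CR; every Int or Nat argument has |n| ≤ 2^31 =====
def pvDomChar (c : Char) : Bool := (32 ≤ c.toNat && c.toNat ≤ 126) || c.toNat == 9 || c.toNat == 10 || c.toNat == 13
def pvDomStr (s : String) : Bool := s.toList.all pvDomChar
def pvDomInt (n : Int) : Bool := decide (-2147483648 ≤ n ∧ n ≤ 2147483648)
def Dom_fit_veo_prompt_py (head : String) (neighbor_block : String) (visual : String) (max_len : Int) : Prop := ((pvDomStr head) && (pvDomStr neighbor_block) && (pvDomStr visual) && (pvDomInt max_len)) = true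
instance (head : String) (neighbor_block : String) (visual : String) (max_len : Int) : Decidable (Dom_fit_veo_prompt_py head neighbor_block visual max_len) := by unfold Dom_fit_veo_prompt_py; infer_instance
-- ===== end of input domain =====

-- B replaces A's per-iteration re-assembly/re-slicing of strings by arithmetic on one
-- end-index into the stripped visual (objective: faster; one final slice instead of
-- O(n) string building per trim step).

-- ===== PORT A =====

-- assemble(v, nb): chunks built in order head, nb, v (non-empty ones), joined by "\n\n"
def pvAsm (H v nb : List Char) : List Char :=
  PySem.Chars.join ['\n', '\n']
    (((if H = [] then [] else [H]) ++ (if nb = [] then [] else [nb])) ++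
      (if v = [] then [] else [v]))

-- the while-loop of A; fuel only makes the recursion structural (each real iteration
-- strictly shrinks v, and fuel = v.length + 1 is supplied, so fuel never runs out)
def pvLoopA (H : List Char) (max_len : Int) : Nat → List Char → List Char
  | 0, v => v
  | fuel + 1, v =>
    if ((pvAsm H v []).length : Int) > max_len ∧ 120 < v.length then
      let v1 := PySem.Chars.rstrip
        (PySem.List.slice v none (some (max 0 ((v.length : Int) - 40))))
      -- 'len(v) > 0 and v[-1] not in " .,;:"' : v[-1] exists iff pyGet? is some;
      -- single-char 'in str' is element membership (exact)
      let v2 := match PySem.List.pyGet? v1 (-1) with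
        | some c =>
          if c ∉ [' ', '.', ',', ';', ':'] then
            let cut := PySem.Chars.rfind v1 [' ']
            PySem.List.slice v1 none
              (some (if 0 < cut then cut else (v1.length : Int) - 1))
          else v1
        | none => v1
      pvLoopA H max_len fuel v2
    else v

def fit_veo_prompt_py (head : String) (neighbor_block : String) (visual : String) (max_len : Int) : String :=
  -- '(visual or "")' is the identity on str arguments
  let V := PySem.Chars.strip visual.toList
  let H := head.toList
  let nb := PySem.Chars.strip neighbor_block.toList
  let body := pvAsm H V nb
  if (body.length : Int) ≤ max_len then String.ofList body
  else
    let body2 := pvAsm H V []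
    if (body2.length : Int) ≤ max_len then
      String.ofList (PySem.List.slice body2 none (some max_len))
    else
      let vf := pvLoopA H max_len (V.length + 1) V
      String.ofList (PySem.List.slice (pvAsm H vf []) none (some max_len))

-- ===== PORT B =====

-- len(assemble-of-head-and-first-j-chars) as pure arithmetic (B's length_at)
def pvLenAt (H : List Char) (j : Nat) : Int :=
  if H = [] then (j : Int)
  else (H.length : Int) + (if 0 < j then 2 + (j : Int) else 0)

-- B's inner 'while j > 0 and v[j-1].isspace(): j -= 1' (structural on j;
-- single-char .isspace() is Chars.isspace; index j-1 is in range whenever used)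
def pvStripIdx (v : List Char) : Nat → Nat
  | 0 => 0
  | m + 1 => if PySem.Chars.isspace (v.getD m ' ') then pvStripIdx v m else m + 1

-- B's outer while-loop on the end index j (fuel as for pvLoopA; never exhausted)
def pvLoopB (H v : List Char) (max_len : Int) : Nat → Nat → Nat
  | 0, j => j
  | fuel + 1, j =>
    if pvLenAt H j > max_len ∧ 120 < j then
      let j1 := pvStripIdx v (j - 40)
      let j2 := match PySem.List.pyGet? v ((j1 : Int) - 1) with
        | some c =>
          if 0 < j1 ∧ c ∉ [' ', '.', ',', ';', ':'] then
            let cut := PySem.Chars.rfindFrom v [' '] 0 (some (j1 : Int))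
            if 0 < cut then cut.toNat else j1 - 1
          else j1
        | none => j1
      pvLoopB H v max_len fuel j2
    else j

def fit_veo_prompt_py_alt (head : String) (neighbor_block : String) (visual : String) (max_len : Int) : String :=
  let v := PySem.Chars.strip visual.toList
  let H := head.toList
  let nb := PySem.Chars.strip neighbor_block.toList
  let full := PySem.Chars.join ['\n', '\n'] (([H, nb, v].filter (fun p => ¬ p = [])))
  if (full.length : Int) ≤ max_len then String.ofList full
  else
    let j0 := v.length
    let j := if pvLenAt H j0 > max_len then pvLoopB H v max_len (j0 + 1) j0 else j0
    -- v[:j] with j : Nat is take j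
    let out := if H ≠ [] ∧ 0 < j then H ++ ['\n', '\n'] ++ v.take j
               else if H ≠ [] then H else v.take j
    String.ofList (PySem.List.slice out none (some max_len))

-- ===== PRECONDITION & SPEC =====
def Spec_fit_veo_prompt_py (head : String) (neighbor_block : String) (visual : String) (max_len : Int) (out : String) : Prop := out = fit_veo_prompt_py_alt head neighbor_block visual max_len
instance (head : String) (neighbor_block : String) (visual : String) (max_len : Int) (out : String) : Decidable (Spec_fit_veo_prompt_py head neighbor_block visual max_len out) := by unfold Spec_fit_veo_prompt_py; infer_instance

-- ===== CLAIM (what is proved, stated in full; the proofs are below) =====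
def Claim_equal_fit_veo_prompt_py : Prop := ∀ (head : String) (neighbor_block : String) (visual : String) (max_len : Int), Dom_fit_veo_prompt_py head neighbor_block visual max_len → Spec_fit_veo_prompt_py head neighbor_block visual max_len (fit_veo_prompt_py head neighbor_block visual max_len)

-- ===== LEMMAS AND PROOFS =====

-- assemble with empty nb, in closed form
lemma pvAsm_empty_nb (H w : List Char) :
    pvAsm H w [] = if H = [] then w else if w = [] then H else H ++ '\n' :: '\n' :: w := by
  unfold pvAsm
  rcases eq_or_ne H [] with hH | hH <;> rcases eq_or_ne w [] with hw | hw <;>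
    simp [hH, hw, PySem.Chars.join, List.intercalate]

lemma pvAsm_len (H w : List Char) : ((pvAsm H w []).length : Int) = pvLenAt H w.length := by
  rw [pvAsm_empty_nb]; unfold pvLenAt
  rcases eq_or_ne H [] with hH | hH <;> rcases eq_or_ne w [] with hw | hw <;>
    simp [hH, hw, List.length_pos_of_ne_nil] <;> push_cast <;> ring

lemma pvAsm_full (H nb V : List Char) :
    pvAsm H V nb = PySem.Chars.join ['\n', '\n'] (([H, nb, V].filter (fun p => ¬ p = []))) := by
  unfold pvAsm
  rcases eq_or_ne H [] with hH | hH <;> rcases eq_or_ne nb [] with hn | hn <;>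
    rcases eq_or_ne V [] with hV | hV <;> simp [hH, hn, hV]

lemma pvStripIdx_le (v : List Char) (m : Nat) : pvStripIdx v m ≤ m := by
  induction m with
  | zero => simp [pvStripIdx]
  | succ k ih => unfold pvStripIdx; split <;> omega

lemma rstrip_take (V : List Char) (m : Nat) (hm : m ≤ V.length) :
    PySem.Chars.rstrip (V.take m) = V.take (pvStripIdx V m) := by
  induction m with
  | zero => simp [pvStripIdx, PySem.Chars.rstrip]
  | succ k ih =>
    have hk : k < V.length := by omega
    have ht : V.take (k + 1) = V.take k ++ [V[k]] := List.take_succ_eq_append_getElem hk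
    have hgd : V.getD k ' ' = V[k] := List.getD_eq_getElem V ' ' hk
    unfold pvStripIdx
    rw [ht, hgd]
    by_cases hs : PySem.Chars.isspace V[k]
    · simp only [hs, if_true]
      rw [← ih (by omega)]
      unfold PySem.Chars.rstrip
      rw [List.reverse_append]
      simp [hs]
    · rw [if_neg hs, ht]
      unfold PySem.Chars.rstrip
      rw [List.reverse_append]
      simp [hs]

lemma rfindFrom_take (V sub : List Char) (j : Nat) (hj : j ≤ V.length) :
    PySem.Chars.rfindFrom V sub 0 (some (j : Int)) = PySem.Chars.rfind (V.take j) sub := by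
  have h1 : ¬ ((V.length : Int) < (j : Int)) := by exact_mod_cast not_lt.mpr hj
  have h2 : ¬ ((j : Int) < 0) := by omega
  simp only [PySem.Chars.rfindFrom, h1, h2, if_false]
  norm_num
  rw [if_neg h2]
  split <;> omega

lemma rfind_go_le (s sub : List Char) (i : Nat) : PySem.Chars.rfind.go s sub i ≤ (i : Int) := by
  induction i with
  | zero => unfold PySem.Chars.rfind.go; split <;> simp
  | succ k ih => unfold PySem.Chars.rfind.go; split <;> simp_all <;> omega

lemma rfind_le_length (s sub : List Char) : PySem.Chars.rfind s sub ≤ (s.length : Int) := by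
  exact rfind_go_le s sub s.length

-- one loop iteration of B, as an explicit function of j (matches pvLoopB's body)
def pvStepB (H V : List Char) (j : Nat) : Nat :=
  let j1 := pvStripIdx V (j - 40)
  match PySem.List.pyGet? V ((j1 : Int) - 1) with
  | some c =>
    if 0 < j1 ∧ c ∉ [' ', '.', ',', ';', ':'] then
      let cut := PySem.Chars.rfindFrom V [' '] 0 (some (j1 : Int))
      if 0 < cut then cut.toNat else j1 - 1
    else j1
  | none => j1

lemma pvLoopB_succ (H v : List Char) (max_len : Int) (fuel j : Nat) :
    pvLoopB H v max_len (fuel + 1) j =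
      if pvLenAt H j > max_len ∧ 120 < j then
        pvLoopB H v max_len fuel (pvStepB H v j)
      else j := by
  rw [pvLoopB.eq_def]
  rfl

lemma pvStepB_le (H V : List Char) (j : Nat) (hj : j ≤ V.length) :
    pvStepB H V j ≤ V.length := by
  unfold pvStepB
  set j1 := pvStripIdx V (j - 40) with hj1def
  have h1 : j1 ≤ j - 40 := pvStripIdx_le V (j - 40)
  cases hg : PySem.List.pyGet? V ((j1 : Int) - 1) with
  | none => simp only [hg]; omega
  | some c =>
    simp only [hg]
    split
    · have h2 : PySem.Chars.rfindFrom V [' '] 0 (some (j1 : Int)) ≤ (j1 : Int) := by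
        rw [rfindFrom_take V [' '] j1 (by omega)]
        have h4 := rfind_le_length (V.take j1) [' ']
        have h3 : ((V.take j1).length : Int) = (j1 : Int) := by
          simp [List.length_take]; omega
        omega
      split <;> omega
    · omega

-- one loop iteration of A's body, abstracted for the step lemma
def pvStepA (v : List Char) : List Char :=
  let v1 := PySem.Chars.rstrip
    (PySem.List.slice v none (some (max 0 ((v.length : Int) - 40))))
  match PySem.List.pyGet? v1 (-1) with
  | some c =>
    if c ∉ [' ', '.', ',', ';', ':'] then
      let cut := PySem.Chars.rfind v1 [' ']
      PySem.List.slice v1 none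
        (some (if 0 < cut then cut else (v1.length : Int) - 1))
    else v1
  | none => v1

lemma pvLoopA_succ (H : List Char) (max_len : Int) (fuel : Nat) (v : List Char) :
    pvLoopA H max_len (fuel + 1) v =
      if ((pvAsm H v []).length : Int) > max_len ∧ 120 < v.length then
        pvLoopA H max_len fuel (pvStepA v)
      else v := by
  rw [pvLoopA.eq_def]
  rfl

lemma stepA_eq (H V : List Char) (max_len : Int) (j : Nat) (hj : j ≤ V.length) (h120 : 120 < j) :
    pvStepA (V.take j) = V.take (pvStepB H V j) := by
  unfold pvStepA
  have hlen : (V.take j).length = j := by simp [List.length_take]; omega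
  have hmax : max 0 (((V.take j).length : Int) - 40) = ((j - 40 : Nat) : Int) := by
    rw [hlen]; omega
  have hv1 : PySem.Chars.rstrip
      (PySem.List.slice (V.take j) none (some (max 0 (((V.take j).length : Int) - 40)))) =
      V.take (pvStripIdx V (j - 40)) := by
    rw [hmax, PySem.List.slice_to_natCast _ (j-40), List.take_take,
      min_eq_left (by omega), rstrip_take V (j - 40) (by omega)]
  rw [hv1]
  unfold pvStepB
  set j1 := pvStripIdx V (j - 40) with hj1def
  have hj1 : j1 ≤ V.length := le_trans (pvStripIdx_le V (j - 40)) (by omega)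
  cases hj1c : j1 with
  | zero =>
    simp only
    cases hg : PySem.List.pyGet? V ((0 : Int) - 1) with
    | none => simp [PySem.List.pyGet?, PySem.List.pyIdx?]
    | some c => simp [PySem.List.pyGet?, PySem.List.pyIdx?]
  | succ s =>
    have hs : s < V.length := by omega
    have hlen1 : (V.take (s + 1)).length = s + 1 := by simp [List.length_take]; omega
    have hgA : PySem.List.pyGet? (V.take (s + 1)) (-1) = some V[s] := by
      simp [PySem.List.pyGet?, PySem.List.pyIdx?, hlen1, List.getElem?_take, hs]
    have hgB : PySem.List.pyGet? V (((s + 1 : Nat) : Int) - 1) = some V[s] := by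
      have : ((s + 1 : Nat) : Int) - 1 = ((s : Nat) : Int) := by push_cast; ring
      simp [this, PySem.List.pyGet?, PySem.List.pyIdx?, hs]
    simp only [hgA, hgB]
    by_cases hcin : V[s] ∈ [' ', '.', ',', ';', ':']
    · simp [hcin]
    · simp only [hcin, not_false_eq_true, and_true, if_pos (Nat.succ_pos s), if_true]
      rw [rfindFrom_take V [' '] (s + 1) (by omega)]
      set cut := PySem.Chars.rfind (V.take (s + 1)) [' '] with hcutdef
      have hcutle : cut ≤ ((s + 1 : Nat) : Int) := by
        have := rfind_le_length (V.take (s + 1)) [' ']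
        rwa [hlen1] at this
      by_cases hcut : 0 < cut
      · rw [if_pos hcut, if_pos hcut, PySem.List.slice_to _ (le_of_lt hcut),
          List.take_take, min_eq_left (by omega)]
      · rw [if_neg hcut, if_neg hcut, hlen1]
        have : ((s + 1 : Nat) : Int) - 1 = ((s : Nat) : Int) := by push_cast; ring
        rw [this, PySem.List.slice_to_natCast _ s, List.take_take, min_eq_left (by omega)]
        simp

set_option maxHeartbeats 1000000 in
lemma loop_eq (H V : List Char) (max_len : Int) (fuel : Nat) :
    ∀ j, j ≤ V.length →
      pvLoopB H V max_len fuel j ≤ V.length ∧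
      pvLoopA H max_len fuel (V.take j) = V.take (pvLoopB H V max_len fuel j) := by
  induction fuel with
  | zero => intro j hj; exact ⟨hj, rfl⟩
  | succ fuel ih =>
    intro j hj
    have hlen : (V.take j).length = j := by simp [List.length_take]; omega
    have hcnd : (((pvAsm H (V.take j) []).length : Int) > max_len ∧ 120 < (V.take j).length)
        ↔ (pvLenAt H j > max_len ∧ 120 < j) := by
      rw [pvAsm_len, hlen]
    by_cases hc : pvLenAt H j > max_len ∧ 120 < j
    · have hcA := hcnd.mpr hc
      have hstep := stepA_eq H V max_len j hj hc.2
      have hstepB := pvStepB_le H V j hj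
      rw [pvLoopA_succ, pvLoopB_succ, if_pos hcA, if_pos hc, hstep]
      exact ih (pvStepB H V j) hstepB
    · have hcA := (not_iff_not.mpr hcnd).mpr hc
      rw [pvLoopA_succ, pvLoopB_succ, if_neg hcA, if_neg hc]
      exact ⟨hj, rfl⟩

-- ===== VERDICT (by name: the statement is the Claim_ definition above) =====
-- B's 'out' expression equals A's assemble(v[:j], "")
lemma out_eq_asm (H V : List Char) (j : Nat) (hj : j ≤ V.length) :
    (if H ≠ [] ∧ 0 < j then H ++ ['\n', '\n'] ++ V.take j
     else if H ≠ [] then H else V.take j) = pvAsm H (V.take j) [] := by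
  rw [pvAsm_empty_nb]
  have hnil : V.take j = [] ↔ j = 0 := by
    rw [List.take_eq_nil_iff]
    constructor
    · rintro (h | h); · exact h
      · subst h; simpa using hj
    · intro h; exact Or.inl h
  rcases eq_or_ne H [] with hH | hH
  · simp [hH]
  · rcases Nat.eq_zero_or_pos j with hjz | hjp
    · simp [hH, hjz]
    · have : ¬ V.take j = [] := fun h => absurd (hnil.mp h) (by omega)
      simp [hH, hjp, this]

theorem fit_veo_prompt_py_spec : Claim_equal_fit_veo_prompt_py := by
  intro head neighbor_block visual max_len _hdom
  unfold Spec_fit_veo_prompt_py fit_veo_prompt_py fit_veo_prompt_py_alt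
  simp only
  set V := PySem.Chars.strip visual.toList with hV
  set H := head.toList with hH
  set nb := PySem.Chars.strip neighbor_block.toList with hnb
  rw [pvAsm_full H nb V]
  by_cases h1 : ((PySem.Chars.join ['\n', '\n']
      ([H, nb, V].filter (fun p => ¬ p = []))).length : Int) ≤ max_len
  · rw [if_pos h1, if_pos h1]
  · rw [if_neg h1, if_neg h1]
    have hlenV : ((pvAsm H V []).length : Int) = pvLenAt H V.length := pvAsm_len H V
    by_cases h2 : ((pvAsm H V []).length : Int) ≤ max_len
    · rw [if_pos h2]
      have h2' : ¬ pvLenAt H V.length > max_len := by omega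
      rw [if_neg h2']
      have h3 := out_eq_asm H V V.length (le_refl _)
      simp only [List.take_length] at h3 ⊢
      rw [h3]
    · rw [if_neg h2]
      have h2' : pvLenAt H V.length > max_len := by omega
      rw [if_pos h2']
      have hloop := loop_eq H V max_len (V.length + 1) V.length (le_refl _)
      rw [List.take_length] at hloop
      rw [hloop.2, out_eq_asm H V _ hloop.1]
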